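-- pv_equiv track=rewrite | github.com/ychanc2104/LeetCode | Binary Search.py | bsearch_left
-- ===== SOURCE A (Python) =====
-- def bsearch_left(nums, target): # bissect_left
--     L, R = 0, len(nums) - 1
--     while L <= R:
--         mid = (L + R) // 2
--         if nums[mid] >= target:
--             R = mid - 1
--         else:
--             L = mid + 1
--     return L  # [0,n]
-- ===== SOURCE B (Python) =====
-- def bsearch_left(nums, target):
--     # single left-to-right scan: first index whose value is >= target
--     for i, x in enumerate(nums):
--         if x >= target:
--             return i
--     return len(nums)
-- ===== Notes on version B (the rewrite author's own statement) =====
-- stated objective: simpler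
-- what changed: Replaces the halving binary search with a single linear scan returning the first index whose value is >= target (len(nums) if none); identical whenever the list is partitioned by target (in particular on any sorted list).
-- outside the precondition, e.g. on bsearch_left([3, 1, 2], 2): A returns 2, B returns 0
import Mathlib
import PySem

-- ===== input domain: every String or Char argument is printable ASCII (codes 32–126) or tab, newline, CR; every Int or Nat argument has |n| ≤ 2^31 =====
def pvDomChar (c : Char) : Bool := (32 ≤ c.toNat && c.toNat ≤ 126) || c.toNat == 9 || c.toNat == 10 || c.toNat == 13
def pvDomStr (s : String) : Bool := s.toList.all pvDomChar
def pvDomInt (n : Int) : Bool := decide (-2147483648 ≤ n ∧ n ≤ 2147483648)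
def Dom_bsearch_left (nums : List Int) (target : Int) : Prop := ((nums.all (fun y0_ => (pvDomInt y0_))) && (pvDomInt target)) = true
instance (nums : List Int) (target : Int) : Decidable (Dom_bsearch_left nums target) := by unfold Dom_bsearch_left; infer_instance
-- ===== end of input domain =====

-- B replaces the binary search by a single linear scan (simpler, not faster); equal on sorted input.

-- ===== PORT A =====
-- while L <= R: mid = (L+R)//2; if nums[mid] >= target: R = mid-1 else: L = mid+1
def bsearchLoop (nums : List Int) (target : Int) (L R : Int) : Int :=
  if h : L ≤ R then
    let mid := PySem.Int.floordiv (L + R) 2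
    match PySem.List.pyGet? nums mid with
    | none => 0   -- IndexError: unreachable, mid is always in [L, R] ⊆ [0, len-1]
    | some v =>
      if v ≥ target then bsearchLoop nums target L (mid - 1)
      else bsearchLoop nums target (mid + 1) R
  else L
termination_by (R + 1 - L).toNat
decreasing_by
  · have := PySem.Int.floordiv_two_mid_bounds h; omega
  · have := PySem.Int.floordiv_two_mid_bounds h; omega

def bsearch_left (nums : List Int) (target : Int) : Int :=
  bsearchLoop nums target 0 ((nums.length : Int) - 1)

-- ===== PORT B =====
-- for i, x in enumerate(nums): if x >= target: return i;  return len(nums)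
def scanLoop (target : Int) (i : Int) : List Int → Int
  | [] => i
  | x :: xs => if x ≥ target then i else scanLoop target (i + 1) xs

def bsearch_left_alt (nums : List Int) (target : Int) : Int :=
  scanLoop target 0 nums

-- ===== PRECONDITION & SPEC =====
-- Pre_ excludes lists not partitioned by target (an element >= target occurring before an
-- element < target, possible only on unsorted input): A still returns a value there, but it
-- is an artifact of the probe order of the halving loop (bisect_left is only specified for
-- sorted input), while B's scan naturally returns the first index with x >= target.
def Pre_bsearch_left (nums : List Int) (target : Int) : Prop :=
  List.Pairwise (fun x y => target ≤ x → target ≤ y) nums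
instance (nums : List Int) (target : Int) : Decidable (Pre_bsearch_left nums target) := by
  unfold Pre_bsearch_left; infer_instance

def pvWitness_bsearch_left : List Int × Int := ([1, 2, 2, 5], 2)

def Spec_bsearch_left (nums : List Int) (target : Int) (out : Int) : Prop := out = bsearch_left_alt nums target
instance (nums : List Int) (target : Int) (out : Int) : Decidable (Spec_bsearch_left nums target out) := by unfold Spec_bsearch_left; infer_instance

-- ===== CLAIM (what is proved, stated in full; the proofs are below) =====
def Claim_equal_bsearch_left : Prop := ∀ (nums : List Int) (target : Int), Dom_bsearch_left nums target → Pre_bsearch_left nums target → Spec_bsearch_left nums target (bsearch_left nums target)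

-- ===== LEMMAS AND PROOFS =====

-- element access used by the proofs
def elemAt (nums : List Int) (j : Nat) : Int := nums.getD j 0

-- the scan result, shifted: scanLoop target i xs = i + scanLoop target 0 xs
lemma scanLoop_shift (target i : Int) (xs : List Int) :
    scanLoop target i xs = i + scanLoop target 0 xs := by
  induction xs generalizing i with
  | nil => simp [scanLoop]
  | cons x xs ih =>
    simp only [scanLoop]
    split_ifs with h
    · simp
    · rw [ih (i + 1), ih (0 + 1)]; ring

lemma scan_bounds (target : Int) (xs : List Int) :
    0 ≤ scanLoop target 0 xs ∧ scanLoop target 0 xs ≤ (xs.length : Int) := by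
  induction xs with
  | nil => simp [scanLoop]
  | cons x xs ih =>
    simp only [scanLoop]
    split_ifs with h
    · exact ⟨le_refl 0, Int.natCast_nonneg _⟩
    · rw [scanLoop_shift]; simp only [List.length_cons]; push_cast; omega

lemma scan_lt (target : Int) (xs : List Int) :
    ∀ j : Nat, (j : Int) < scanLoop target 0 xs → elemAt xs j < target := by
  induction xs with
  | nil => simp [scanLoop]
  | cons x xs ih =>
    intro j hj
    simp only [scanLoop] at hj
    split_ifs at hj with h
    · omega
    · rw [scanLoop_shift] at hj
      cases j with
      | zero => simpa [elemAt] using not_le.mp h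
      | succ k =>
        have := ih k (by push_cast at hj ⊢; omega)
        simpa [elemAt] using this

lemma scan_ge (target : Int) (xs : List Int) :
    scanLoop target 0 xs < (xs.length : Int) →
    target ≤ elemAt xs (scanLoop target 0 xs).toNat := by
  induction xs with
  | nil => simp [scanLoop]
  | cons x xs ih =>
    simp only [scanLoop]
    split_ifs with h
    · intro _; simpa [elemAt] using h
    · rw [scanLoop_shift]
      intro hlt
      have hb := scan_bounds target xs
      have h1 : ((0 : Int) + 1 + scanLoop target 0 xs).toNat = (scanLoop target 0 xs).toNat + 1 := by
        omega
      have := ih (by simp only [List.length_cons] at hlt; push_cast at hlt ⊢; omega)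
      rw [h1]
      simpa [elemAt] using this

-- the partition property as an index-wise statement
lemma part_elemAt {nums : List Int} {target : Int}
    (hs : List.Pairwise (fun x y => target ≤ x → target ≤ y) nums)
    {i j : Nat} (hij : i ≤ j) (hj : j < nums.length) :
    target ≤ elemAt nums i → target ≤ elemAt nums j := by
  rcases Nat.lt_or_eq_of_le hij with h | h
  · have := (List.pairwise_iff_getElem.mp hs) i j (by omega) hj h
    simpa [elemAt, List.getD_eq_getElem?_getD, List.getElem?_eq_getElem, hj,
      Nat.lt_trans h hj] using this
  · subst h; exact id

-- invariant-carrying characterisation of the binary-search loop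
lemma bsearchLoop_spec (nums : List Int) (target : Int)
    (hs : List.Pairwise (fun x y => target ≤ x → target ≤ y) nums) :
    ∀ L R : Int, 0 ≤ L → R < (nums.length : Int) → L ≤ R + 1 →
    (∀ j : Nat, (j : Int) < L → elemAt nums j < target) →
    (∀ j : Nat, R < (j : Int) → j < nums.length → target ≤ elemAt nums j) →
    (L ≤ bsearchLoop nums target L R ∧ bsearchLoop nums target L R ≤ R + 1 ∧
     (∀ j : Nat, (j : Int) < bsearchLoop nums target L R → elemAt nums j < target) ∧
     (∀ j : Nat, bsearchLoop nums target L R ≤ (j : Int) → j < nums.length →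
        target ≤ elemAt nums j)) := by
  intro L R
  induction L, R using bsearchLoop.induct nums target with
  | case1 L R h mid hv =>
    -- pyGet? = none is impossible: mid ∈ [L,R] ⊆ [0, len-1]
    intro hL hR hLR hlo hhi
    have hmid : L ≤ mid ∧ mid ≤ R := PySem.Int.floordiv_two_mid_bounds h
    exfalso
    rw [PySem.List.pyGet?_eq_none_iff] at hv
    simp only [PySem.Raise.InRange] at hv
    omega
  | case2 L R h mid v hv hge ih =>
    intro hL hR hLR hlo hhi
    have hmid : L ≤ mid ∧ mid ≤ R := PySem.Int.floordiv_two_mid_bounds h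
    rw [bsearchLoop]
    simp only [dif_pos h]
    rw [hv]
    simp only [if_pos hge]
    have hmideq : mid = PySem.Int.floordiv (L + R) 2 := rfl
    rw [← hmideq]
    have hv' : nums[mid.toNat]? = some v :=
      (PySem.List.pyGet?_of_nonneg (xs := nums) (i := mid) (by omega)).symm.trans hv
    have hvv : v = elemAt nums mid.toNat := by
      simp [elemAt, List.getD_eq_getElem?_getD, hv']
    have hrec := ih hL (by omega) (by omega) hlo
      (by
        intro j hj hjlen
        have hmj : mid.toNat ≤ j := by omega
        exact part_elemAt hs hmj hjlen (hvv ▸ hge))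
    exact ⟨by omega, by omega, hrec.2.2.1, hrec.2.2.2⟩
  | case3 L R h mid v hv hge ih =>
    intro hL hR hLR hlo hhi
    have hmid : L ≤ mid ∧ mid ≤ R := PySem.Int.floordiv_two_mid_bounds h
    rw [bsearchLoop]
    simp only [dif_pos h]
    rw [hv]
    simp only [if_neg hge]
    have hmideq : mid = PySem.Int.floordiv (L + R) 2 := rfl
    rw [← hmideq]
    have hv' : nums[mid.toNat]? = some v :=
      (PySem.List.pyGet?_of_nonneg (xs := nums) (i := mid) (by omega)).symm.trans hv
    have hvv : v = elemAt nums mid.toNat := by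
      simp [elemAt, List.getD_eq_getElem?_getD, hv']
    have hrec := ih (by omega) hR (by omega)
      (by
        intro j hj
        have hjm : j ≤ mid.toNat := by omega
        by_contra hc
        exact hge (hvv ▸ part_elemAt hs hjm (by omega) (not_lt.mp hc)))
      hhi
    exact ⟨by omega, hrec.2.1, hrec.2.2.1, hrec.2.2.2⟩
  | case4 L R h =>
    intro hL hR hLR hlo hhi
    rw [bsearchLoop]
    simp only [dif_neg h]
    exact ⟨le_refl _, by omega, hlo, fun j hj hjlen => hhi j (by omega) hjlen⟩

-- ===== VERDICT (by name: the statement is the Claim_ definition above) =====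
theorem bsearch_left_spec : Claim_equal_bsearch_left := by
  intro nums target _ hpre
  unfold Spec_bsearch_left bsearch_left bsearch_left_alt
  have hA := bsearchLoop_spec nums target hpre 0 ((nums.length : Int) - 1)
    (le_refl 0) (by omega) (by omega)
    (by intro j hj; omega)
    (by intro j hj hjlen; omega)
  have hbb := scan_bounds target nums
  set a := bsearchLoop nums target 0 ((nums.length : Int) - 1) with ha
  set b := scanLoop target 0 nums with hb
  rcases lt_trichotomy a b with hlt | heq | hgt
  · -- a < b : elemAt a.toNat both < target (scan) and ≥ target (binary)
    exfalso
    have h1 := scan_lt target nums a.toNat (by rw [← hb]; omega)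
    have h2 := hA.2.2.2 a.toNat (by omega) (by omega)
    omega
  · exact heq
  · -- b < a : elemAt b.toNat both ≥ target (scan) and < target (binary)
    exfalso
    have h1 := scan_ge target nums (by rw [← hb]; omega)
    rw [← hb] at h1
    have h2 := hA.2.2.1 b.toNat (by omega)
    omega
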